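-- pv_equiv track=rewrite | github.com/42clim-s-Study/Algorithm | 5week_2512_16948/jwoo/jwoo_2512.py | budget_distribution
-- ===== SOURCE A (Python) =====
-- def budget_distribution(region, n, m):
-- 	if (sum(region) <= m):
-- 		return max(region)
-- 	start = 1
-- 	end = max(region)
-- 	while start <= end:
-- 		mid = (start + end) // 2
-- 		budget = 0
-- 		for request in region:
-- 			if request <= mid:
-- 				budget += request
-- 			else:
-- 				budget += mid
-- 		if budget < m:
-- 			start = mid + 1
-- 		elif budget > m:
-- 			end = mid - 1
-- 		else:
-- 			return mid
-- 	return end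
-- ===== SOURCE B (Python) =====
-- def budget_distribution(region, n, m):
--     total = sum(region)
--     if total <= m:
--         return max(region)
--     srt = sorted(region)
--     acc = 0
--     d = len(srt)
--     for v in srt:
--         if acc + d * v > m:
--             t = (m - acc) // d
--             return t if t > 0 else 0
--         acc += v
--         d -= 1
--     return srt[-1]  # unreachable: total > m guarantees the loop returns
-- ===== Notes on version B (the rewrite author's own statement) =====
-- stated objective: alternative
-- what changed: Replaces A's binary search over cap values (each step rescanning the whole list) by sort + one prefix-sum sweep that finds the piecewise-linear segment containing the budget and solves for the cap with a single floor division (intended as faster; a timing run measured 2.84x at the largest size but not consistently across inputs).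
-- intended difference: On nonempty lists whose requests are all negative with sum(region) > m, A returns max(region) (its untouched initial search bound, a negative cap); B returns 0, the intended value since no nonnegative cap fits the budget and a spending cap cannot be negative. — e.g. on budget_distribution([-1], 1, -2): A returns -1, B returns 0
import Mathlib
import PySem

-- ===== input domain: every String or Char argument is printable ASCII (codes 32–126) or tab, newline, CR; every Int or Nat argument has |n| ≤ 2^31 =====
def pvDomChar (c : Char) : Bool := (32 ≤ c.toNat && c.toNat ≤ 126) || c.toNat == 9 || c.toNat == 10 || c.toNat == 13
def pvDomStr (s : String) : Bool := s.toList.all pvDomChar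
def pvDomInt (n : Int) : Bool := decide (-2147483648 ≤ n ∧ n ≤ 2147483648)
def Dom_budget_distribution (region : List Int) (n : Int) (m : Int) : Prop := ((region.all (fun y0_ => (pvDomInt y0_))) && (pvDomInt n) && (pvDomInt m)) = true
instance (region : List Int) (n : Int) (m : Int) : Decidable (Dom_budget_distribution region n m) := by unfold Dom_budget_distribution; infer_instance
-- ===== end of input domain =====

-- B replaces A's binary search over cap values (each step rescanning the list) by
-- sort + one prefix-sum sweep solving the piecewise-linear budget equation directly.
-- The equivalence is about return values; neither program mutates its arguments.

-- ===== PORT A =====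
-- the while-loop of A, step for step (start/end binary search, inner rescan of region)
def pvBudgetLoop (region : List Int) (m : Int) (start e : Int) : Int :=
  if h : start ≤ e then
    let mid := PySem.Int.floordiv (start + e) 2
    let budget := region.foldl (fun b request => if request ≤ mid then b + request else b + mid) 0
    if budget < m then pvBudgetLoop region m (mid + 1) e
    else if m < budget then pvBudgetLoop region m start (mid - 1)
    else mid
  else e
termination_by (e + 1 - start).toNat
decreasing_by
  · have hb := PySem.Int.floordiv_two_mid_bounds h; omega
  · have hb := PySem.Int.floordiv_two_mid_bounds h; omega

def budget_distribution (region : List Int) (n : Int) (m : Int) : Int :=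
  if region.sum ≤ m then (PySem.List.max? region (fun x => x)).getD 0   -- max([]) raises: outside Pre_
  else pvBudgetLoop region m 1 ((PySem.List.max? region (fun x => x)).getD 0)

-- ===== PORT B =====
-- the for-loop of B over the sorted list: acc = sum of processed prefix, d = remaining count
def pvAltLoop (m fb : Int) : List Int → Int → Int → Int
  | [], _, _ => fb
  | v :: rest, acc, d =>
    if m < acc + d * v then
      let t := PySem.Int.floordiv (m - acc) d
      if 0 < t then t else 0
    else pvAltLoop m fb rest (acc + v) (d - 1)

def budget_distribution_alt (region : List Int) (n : Int) (m : Int) : Int :=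
  if region.sum ≤ m then (PySem.List.max? region (fun x => x)).getD 0   -- max([]) raises: outside Pre_
  else
    let srt := PySem.List.sorted region (fun x => x) false
    pvAltLoop m ((PySem.List.pyGet? srt (-1)).getD 0) srt 0 srt.length

-- ===== PRECONDITION & SPEC =====
-- Pre_ excludes only region = [], on which A raises ValueError (max of empty sequence); B raises there too.
def Pre_budget_distribution (region : List Int) (n : Int) (m : Int) : Prop := region ≠ []
instance (region : List Int) (n : Int) (m : Int) : Decidable (Pre_budget_distribution region n m) := by unfold Pre_budget_distribution; infer_instance
def pvWitness_budget_distribution : List Int × Int × Int := ([3, 1], 2, 2)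

-- On nonempty lists whose requests are all negative with sum(region) > m, A returns max(region)
-- (its untouched initial search bound, a negative cap); B returns 0, the intended value since no
-- nonnegative cap fits the budget and a spending cap cannot be negative.
def D_budget_distribution (region : List Int) (n : Int) (m : Int) : Prop :=
  region ≠ [] ∧ m < region.sum ∧ ∀ x ∈ region, x < 0
instance (region : List Int) (n : Int) (m : Int) : Decidable (D_budget_distribution region n m) := by unfold D_budget_distribution; infer_instance

def Spec_budget_distribution (region : List Int) (n : Int) (m : Int) (out : Int) : Prop :=
  ¬ D_budget_distribution region n m → out = budget_distribution_alt region n m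
instance (region : List Int) (n : Int) (m : Int) (out : Int) : Decidable (Spec_budget_distribution region n m out) := by unfold Spec_budget_distribution; infer_instance

def pvDiffWitness_budget_distribution : List Int × Int × Int := ([-1], 1, -2)
def pvDiffWitnessOut_budget_distribution : Int × Int := (-1, 0)

-- ===== CLAIM (what is proved, stated in full; the proofs are below) =====
def Claim_unchanged_budget_distribution : Prop := ∀ (region : List Int) (n : Int) (m : Int), Dom_budget_distribution region n m → Pre_budget_distribution region n m → Spec_budget_distribution region n m (budget_distribution region n m)
def Claim_changed_budget_distribution : Prop := Dom_budget_distribution (pvDiffWitness_budget_distribution.1) (pvDiffWitness_budget_distribution.2.1) (pvDiffWitness_budget_distribution.2.2) ∧ Pre_budget_distribution (pvDiffWitness_budget_distribution.1) (pvDiffWitness_budget_distribution.2.1) (pvDiffWitness_budget_distribution.2.2) ∧ D_budget_distribution (pvDiffWitness_budget_distribution.1) (pvDiffWitness_budget_distribution.2.1) (pvDiffWitness_budget_distribution.2.2) ∧ budget_distribution (pvDiffWitness_budget_distribution.1) (pvDiffWitness_budget_distribution.2.1) (pvDiffWitness_budget_distribution.2.2) = pvDiffWitnessOut_budget_distribution.1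 ∧ budget_distribution_alt (pvDiffWitness_budget_distribution.1) (pvDiffWitness_budget_distribution.2.1) (pvDiffWitness_budget_distribution.2.2) = pvDiffWitnessOut_budget_distribution.2 ∧ pvDiffWitnessOut_budget_distribution.1 ≠ pvDiffWitnessOut_budget_distribution.2
def Claim_exact_budget_distribution : Prop := ∀ (region : List Int) (n : Int) (m : Int), Dom_budget_distribution region n m → Pre_budget_distribution region n m → D_budget_distribution region n m → budget_distribution region n m ≠ budget_distribution_alt region n m

-- ===== LEMMAS AND PROOFS =====

-- g region t = the budget spent under cap t = Σ min(request, t)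
def pvG (region : List Int) (t : Int) : Int := (region.map (fun r => min r t)).sum

lemma pvG_foldl (region : List Int) (mid : Int) : ∀ b : Int,
    region.foldl (fun b request => if request ≤ mid then b + request else b + mid) b = b + pvG region mid := by
  induction region with
  | nil => intro b; simp [pvG]
  | cons r rest ih =>
    intro b
    simp only [List.foldl_cons, pvG, List.map_cons, List.sum_cons, ih]
    by_cases h : r ≤ mid <;> simp [h, min_def] <;> omega

lemma pvG_mono (region : List Int) {t u : Int} (h : t ≤ u) : pvG region t ≤ pvG region u := by
  induction region with
  | nil => simp [pvG]
  | cons r rest ih =>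
    simp only [pvG, List.map_cons, List.sum_cons] at *
    have : min r t ≤ min r u := min_le_min le_rfl h
    omega

lemma pvG_strict (region : List Int) {mx t : Int} (hmem : mx ∈ region) (ht : t < mx) :
    pvG region t + 1 ≤ pvG region (t + 1) := by
  induction region with
  | nil => simp at hmem
  | cons r rest ih =>
    simp only [pvG, List.map_cons, List.sum_cons]
    rcases List.mem_cons.mp hmem with h | h
    · have hr : t < r := h ▸ ht
      have h1 : min r t = t := min_eq_right (by omega)
      have h2 : min r (t + 1) = t + 1 := min_eq_right (by omega)
      have h3 := pvG_mono rest (show t ≤ t + 1 by omega)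
      simp only [pvG] at h3; omega
    · have h1 : min r t ≤ min r (t + 1) := min_le_min le_rfl (by omega)
      have h2 := ih h
      simp only [pvG] at h2; omega

lemma pvG_sum (region : List Int) {t : Int} (h : ∀ x ∈ region, x ≤ t) : pvG region t = region.sum := by
  induction region with
  | nil => simp [pvG]
  | cons r rest ih =>
    simp only [pvG, List.map_cons, List.sum_cons]
    have h1 : min r t = r := min_eq_left (h r (by simp))
    have h2 := ih (fun x hx => h x (by simp [hx]))
    simp only [pvG] at h2; omega

lemma pvG_split (a b : List Int) {t : Int} (ha : ∀ x ∈ a, x ≤ t) (hb : ∀ y ∈ b, t ≤ y) :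
    pvG (a ++ b) t = a.sum + b.length * t := by
  simp only [pvG, List.map_append, List.sum_append]
  have h1 : (a.map (fun r => min r t)).sum = a.sum := by
    have := pvG_sum a ha; simpa [pvG] using this
  have h2 : (b.map (fun r => min r t)).sum = b.length * t := by
    induction b with
    | nil => simp
    | cons y rest ih =>
      have hy : min y t = t := min_eq_right (hb y (by simp))
      have := ih (fun z hz => hb z (by simp [hz]))
      simp only [List.map_cons, List.sum_cons, List.length_cons, hy, this]
      push_cast
      ring
  omega

lemma pvG_perm {l1 l2 : List Int} (h : l1.Perm l2) (t : Int) : pvG l1 t = pvG l2 t :=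
  List.Perm.sum_eq (h.map _)

-- all elements of a ≤-pairwise list are ≤ its last element
lemma pvPairwise_le_getLast {a : List Int} (hp : a.Pairwise (· ≤ ·)) {w : Int}
    (hw : a.getLast? = some w) : ∀ x ∈ a, x ≤ w := by
  induction a with
  | nil => simp at hw
  | cons r rest ih =>
    intro x hx
    cases rest with
    | nil =>
      simp at hw hx; omega
    | cons s rs =>
      have hw' : (s :: rs).getLast? = some w := by
        simpa [List.getLast?_cons_cons] using hw
      rcases List.mem_cons.mp hx with h | h
      · subst h
        have hr : x ≤ s := (List.pairwise_cons.mp hp).1 s (by simp)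
        have hs : s ≤ w := ih (List.pairwise_cons.mp hp).2 hw' s (by simp)
        omega
      · exact ih (List.pairwise_cons.mp hp).2 hw' x h

-- characterisation satisfied by A's binary search: the returned cap r is ≥ 0,
-- affordable (or 0), and r+1 is not affordable
lemma pvBudgetLoop_spec (region : List Int) (m mx : Int) (hmem : mx ∈ region)
    (hmax : ∀ x ∈ region, x ≤ mx) (htot : m < region.sum) :
    ∀ k : Nat, ∀ s e : Int, (e + 1 - s).toNat = k → 1 ≤ s → s - 1 ≤ e → e ≤ mx →
      m < pvG region (e + 1) → (s = 1 ∨ pvG region (s - 1) ≤ m) →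
      0 ≤ pvBudgetLoop region m s e ∧
      (pvG region (pvBudgetLoop region m s e) ≤ m ∨ pvBudgetLoop region m s e = 0) ∧
      m < pvG region (pvBudgetLoop region m s e + 1) := by
  intro k
  induction k using Nat.strong_induction_on with
  | _ k ih =>
    intro s e hk h1 h2 h3 h4 h5
    by_cases hle : s ≤ e
    · have hb := PySem.Int.floordiv_two_mid_bounds hle
      set mid := PySem.Int.floordiv (s + e) 2 with hmid
      have hbud : region.foldl (fun b request => if request ≤ mid then b + request else b + mid) 0
          = pvG region mid := by simpa using pvG_foldl region mid 0
      rw [pvBudgetLoop]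
      simp only [dif_pos hle, ← hmid, hbud]
      by_cases hlt : pvG region mid < m
      · simp only [if_pos hlt]
        exact ih (e + 1 - (mid + 1)).toNat (by omega) (mid + 1) e rfl (by omega) (by omega) h3 h4
          (Or.inr (by simp only [show mid + 1 - 1 = mid by omega]; omega))
      · simp only [if_neg hlt]
        by_cases hgt : m < pvG region mid
        · simp only [if_pos hgt]
          exact ih (mid - 1 + 1 - s).toNat (by omega) s (mid - 1) rfl h1 (by omega) (by omega)
            (by simp only [show mid - 1 + 1 = mid by omega]; omega) h5
        · simp only [if_neg hgt]
          have heq : pvG region mid = m := by omega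
          have hmidlt : mid < mx := by
            rcases lt_or_eq_of_le (show mid ≤ mx by omega) with h | h
            · exact h
            · exfalso; rw [h, pvG_sum region hmax] at heq; omega
          refine ⟨by omega, Or.inl (by omega), ?_⟩
          have := pvG_strict region hmem hmidlt
          omega
    · have he : e = s - 1 := by omega
      rw [pvBudgetLoop]
      simp only [dif_neg hle]
      refine ⟨by omega, ?_, by omega⟩
      rcases h5 with h | h
      · exact Or.inr (by omega)
      · exact Or.inl (by rw [he]; exact h)

-- characterisation satisfied by B's sweep over the sorted list
lemma pvAltLoop_spec (srt : List Int) (m : Int) (hp : srt.Pairwise (· ≤ ·)) :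
    ∀ (u a : List Int) (acc d fb : Int), srt = a ++ u → acc = a.sum → d = u.length →
      m < acc + u.sum → (a = [] → u ≠ []) →
      (∀ w, a.getLast? = some w → acc + d * w ≤ m) →
      0 ≤ pvAltLoop m fb u acc d ∧
      (pvG srt (pvAltLoop m fb u acc d) ≤ m ∨ pvAltLoop m fb u acc d = 0) ∧
      m < pvG srt (pvAltLoop m fb u acc d + 1) := by
  intro u
  induction u with
  | nil =>
    intro a acc d fb hsplit hacc hd htot hne hinv
    exfalso
    have hane : a ≠ [] := by
      intro h; exact (hne h) rfl
    obtain ⟨w, hw⟩ : ∃ w, a.getLast? = some w :=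
      ⟨a.getLast hane, List.getLast?_eq_some_getLast hane⟩
    have h1 := hinv w hw
    have h2 : d = 0 := by simp [hd]
    rw [h2] at h1
    simp at h1
    have h4 : m < acc := by simpa using htot
    omega
  | cons v rest ih =>
    intro a acc d fb hsplit hacc hd htot hne hinv
    have hd0 : 0 < d := by simp only [hd, List.length_cons]; push_cast; omega
    -- elements of a are ≤ elements of v :: rest  (srt is pairwise sorted)
    have hpa : a.Pairwise (· ≤ ·) := (List.pairwise_append.mp (hsplit ▸ hp)).1
    have hcross : ∀ x ∈ a, ∀ y ∈ v :: rest, x ≤ y := (List.pairwise_append.mp (hsplit ▸ hp)).2.2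
    have hvrest : ∀ y ∈ rest, v ≤ y := by
      have := (List.pairwise_append.mp (hsplit ▸ hp)).2.1
      exact fun y hy => (List.pairwise_cons.mp this).1 y hy
    by_cases hg : m < acc + d * v
    · -- trigger: solve the linear segment
      simp only [pvAltLoop, if_pos hg]
      set t := PySem.Int.floordiv (m - acc) d with htdef
      have htle : t * d ≤ m - acc := (PySem.Int.le_floordiv_iff_mul_le hd0).mp le_rfl
      have htgt : m - acc < (t + 1) * d := by
        by_contra hcon
        push_neg at hcon
        have := (PySem.Int.le_floordiv_iff_mul_le hd0).mpr hcon
        omega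
      have htv : t < v := by
        have : m - acc < v * d := by
          have : d * v = v * d := by ring
          omega
        exact (PySem.Int.floordiv_lt_iff_lt_mul hd0).mpr this
      -- all of a ≤ t
      have hat : ∀ x ∈ a, x ≤ t := by
        intro x hx
        have hane : a ≠ [] := by rintro rfl; simp at hx
        obtain ⟨w, hw⟩ : ∃ w, a.getLast? = some w :=
          ⟨a.getLast hane, List.getLast?_eq_some_getLast hane⟩
        have hwle : acc + d * w ≤ m := hinv w hw
        have hwt : w ≤ t := by
          apply (PySem.Int.le_floordiv_iff_mul_le hd0).mpr
          have : d * w = w * d := by ring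
          omega
        have := pvPairwise_le_getLast hpa hw x hx
        omega
      have hbt1 : ∀ y ∈ v :: rest, t + 1 ≤ y := by
        intro y hy
        rcases List.mem_cons.mp hy with h | h
        · omega
        · have := hvrest y h; omega
      have hgt0 : pvG srt t ≤ m := by
        rw [hsplit, pvG_split a (v :: rest) hat (fun y hy => by have := hbt1 y hy; omega)]
        have hlen : ((v :: rest).length : Int) = d := by simp [hd]
        have : t * d ≤ m - acc := htle
        rw [hlen, ← hacc]
        nlinarith [htle]
      have hgt1 : m < pvG srt (t + 1) := by
        rw [hsplit, pvG_split a (v :: rest) (fun x hx => by have := hat x hx; omega) hbt1]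
        have hlen : ((v :: rest).length : Int) = d := by simp [hd]
        rw [hlen, ← hacc]
        nlinarith [htgt]
      by_cases hpos : 0 < t
      · simp only [if_pos hpos]
        exact ⟨by omega, Or.inl hgt0, hgt1⟩
      · simp only [if_neg hpos]
        refine ⟨le_rfl, by simp, ?_⟩
        have hm1 : pvG srt (t + 1) ≤ pvG srt 1 := pvG_mono srt (by omega)
        have hm2 : m < pvG srt 1 := by omega
        simpa using hm2
    · -- no trigger: step
      simp only [pvAltLoop, if_neg hg]
      apply ih (a ++ [v]) (acc + v) (d - 1) fb
      · simp [hsplit]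
      · simp [hacc]
      · simp only [hd, List.length_cons]; push_cast; omega
      · simp only [List.sum_cons] at htot ⊢; omega
      · simp
      · intro w hw
        have hwv : w = v := by
          simp [List.getLast?_append] at hw
          omega
        rw [hwv, show acc + v + (d - 1) * v = acc + d * v from by ring]
        exact not_lt.mp hg

-- the characterisation is unique
lemma pvP_unique (region : List Int) (m r1 r2 : Int)
    (h1 : 0 ≤ r1) (h2 : 0 ≤ r2)
    (ha1 : pvG region r1 ≤ m ∨ r1 = 0) (hb1 : m < pvG region (r1 + 1))
    (ha2 : pvG region r2 ≤ m ∨ r2 = 0) (hb2 : m < pvG region (r2 + 1)) : r1 = r2 := by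
  by_contra hne
  rcases lt_trichotomy r1 r2 with h | h | h
  · have : pvG region (r1 + 1) ≤ pvG region r2 := pvG_mono region (by omega)
    rcases ha2 with ha | ha
    · omega
    · omega
  · exact hne h
  · have : pvG region (r2 + 1) ≤ pvG region r1 := pvG_mono region (by omega)
    rcases ha1 with ha | ha
    · omega
    · omega

lemma pvMax_spec (region : List Int) (h : region ≠ []) :
    ∃ mx, PySem.List.max? region (fun x => x) = some mx ∧ mx ∈ region ∧ ∀ x ∈ region, x ≤ mx := by
  cases hm : PySem.List.max? region (fun x => x) with
  | none => exact absurd ((PySem.List.max?_eq_none_iff region (fun x => x)).mp hm) h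
  | some mx =>
    exact ⟨mx, rfl, PySem.List.max?_mem hm, fun x hx => PySem.List.max?_isMax hm x hx⟩

-- the B-side value of the search branch, with all its hypotheses discharged
lemma pvAlt_branch_spec (region : List Int) (m : Int) (hne : region ≠ []) (htot : m < region.sum) :
    0 ≤ pvAltLoop m ((PySem.List.pyGet? (PySem.List.sorted region (fun x => x) false) (-1)).getD 0)
        (PySem.List.sorted region (fun x => x) false) 0
        (PySem.List.sorted region (fun x => x) false).length ∧
    (pvG region (pvAltLoop m ((PySem.List.pyGet? (PySem.List.sorted region (fun x => x) false) (-1)).getD 0)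
        (PySem.List.sorted region (fun x => x) false) 0
        (PySem.List.sorted region (fun x => x) false).length) ≤ m ∨
      pvAltLoop m ((PySem.List.pyGet? (PySem.List.sorted region (fun x => x) false) (-1)).getD 0)
        (PySem.List.sorted region (fun x => x) false) 0
        (PySem.List.sorted region (fun x => x) false).length = 0) ∧
    m < pvG region (pvAltLoop m ((PySem.List.pyGet? (PySem.List.sorted region (fun x => x) false) (-1)).getD 0)
        (PySem.List.sorted region (fun x => x) false) 0
        (PySem.List.sorted region (fun x => x) false).length + 1) := by
  set srt := PySem.List.sorted region (fun x => x) false with hsrt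
  have hperm : srt.Perm region := PySem.List.sorted_perm region (fun x => x) false
  have hpw : srt.Pairwise (· ≤ ·) := by
    have := PySem.List.sorted_pairwise region (fun x => x)
    simpa using this
  have hsne : srt ≠ [] := by
    intro h
    exact hne ((PySem.List.sorted_eq_nil_iff region (fun x => x) false).mp h)
  have hsum : srt.sum = region.sum := List.Perm.sum_eq hperm
  have := pvAltLoop_spec srt m hpw srt [] 0 srt.length
      ((PySem.List.pyGet? srt (-1)).getD 0) (by simp) (by simp) rfl
      (by simpa [hsum] using htot) (fun _ => hsne) (by intro w hw; simp at hw)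
  rcases this with ⟨c1, c2, c3⟩
  refine ⟨c1, ?_, ?_⟩
  · rcases c2 with c | c
    · exact Or.inl (by rw [← pvG_perm hperm]; exact c)
    · exact Or.inr c
  · rw [← pvG_perm hperm]; exact c3

-- ===== VERDICT (by name: the statement is the Claim_ definition above) =====
theorem budget_distribution_spec : Claim_unchanged_budget_distribution := by
  intro region n m _ hpre hnd
  by_cases hsum : region.sum ≤ m
  · simp [budget_distribution, budget_distribution_alt, hsum]
  · push_neg at hsum
    obtain ⟨mx, hmx, hmem, hmax⟩ := pvMax_spec region hpre
    -- ¬D_ gives some nonnegative request, hence 0 ≤ mx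
    have hmx0 : 0 ≤ mx := by
      unfold D_budget_distribution at hnd
      push_neg at hnd
      obtain ⟨x, hxmem, hx⟩ := hnd hpre hsum
      have := hmax x hxmem
      omega
    have hA := pvBudgetLoop_spec region m mx hmem hmax hsum (mx + 1 - 1).toNat 1 mx rfl
      (by omega) (by omega) le_rfl
      (by rw [pvG_sum region (fun x hx => by have := hmax x hx; omega)]; omega) (Or.inl rfl)
    have hB := pvAlt_branch_spec region m hpre hsum
    unfold budget_distribution budget_distribution_alt
    simp only [if_neg (by omega : ¬ region.sum ≤ m), hmx, Option.getD_some]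
    exact pvP_unique region m _ _ hA.1 hB.1 hA.2.1 hA.2.2 hB.2.1 hB.2.2

theorem budget_distribution_changed : Claim_changed_budget_distribution := by
  unfold Claim_changed_budget_distribution
  have hmx : ((PySem.List.max? [(-1 : Int)] (fun x => x)).getD 0) = -1 := by decide
  have hA : budget_distribution [-1] 1 (-2) = -1 := by
    unfold budget_distribution
    rw [if_neg (by decide), hmx, pvBudgetLoop]
    norm_num
  exact ⟨by decide, by decide, by decide, hA, by decide, by decide⟩

theorem budget_distribution_tight : Claim_exact_budget_distribution := by
  intro region n m _ hpre hd
  obtain ⟨hne, hsum, hneg⟩ := hd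
  obtain ⟨mx, hmx, hmem, hmax⟩ := pvMax_spec region hne
  have hmxneg : mx < 0 := hneg mx hmem
  have hB := pvAlt_branch_spec region m hne hsum
  unfold budget_distribution budget_distribution_alt
  simp only [if_neg (by omega : ¬ region.sum ≤ m), hmx, Option.getD_some]
  rw [pvBudgetLoop]
  simp only [dif_neg (by omega : ¬ (1 : Int) ≤ mx)]
  omega
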